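-- pv_equiv track=rewrite | github.com/DavidDuncker/FultonCountyBallotScanner | duplicates/dupe_batches_with_barcode_tally.py | group_together_duplicate_batches
-- ===== SOURCE A (Python) =====
-- def group_together_duplicate_batches(tally_of_barcodes):
--     groups_of_identical_batches = []
--     for tabulator1 in tally_of_barcodes.keys():
--         if tabulator1 != "total":
--             for batch1 in tally_of_barcodes[tabulator1].keys():
--                 if batch1 != "total":
--                     group_of_identical_batches = [f"/{tabulator1}/{batch1}"]
--                     for tabulator2 in tally_of_barcodes.keys():
--                         for batch2 in tally_of_barcodes[tabulator2].keys():
--                             if tally_of_barcodes[tabulator1][batch1] == tally_of_barcodes[tabulator2][batch2]\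
--                                     and (tabulator1 != tabulator2 or batch1 != batch2):
--                                 group_of_identical_batches.append(f"/{tabulator2}/{batch2}")
--                     if len(group_of_identical_batches) > 1:
--                         groups_of_identical_batches.append(group_of_identical_batches)
--     return groups_of_identical_batches
-- ===== SOURCE B (Python) =====
-- def group_together_duplicate_batches(tally_of_barcodes):
--     # Index every (tabulator, batch) by a canonical form of its tally dict,
--     # then emit each qualifying batch's group by one dictionary lookup.
--     index = {}
--     for tabulator, batches in tally_of_barcodes.items():
--         for batch, tally in batches.items():
--             key = tuple(sorted(tally.items(), key=lambda kv: kv[0]))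
--             index.setdefault(key, []).append((tabulator, batch))
--     groups_of_identical_batches = []
--     for tabulator, batches in tally_of_barcodes.items():
--         if tabulator == "total":
--             continue
--         for batch, tally in batches.items():
--             if batch == "total":
--                 continue
--             members = index[tuple(sorted(tally.items(), key=lambda kv: kv[0]))]
--             if len(members) > 1:
--                 groups_of_identical_batches.append(
--                     [f"/{tabulator}/{batch}"]
--                     + [f"/{t}/{b}" for (t, b) in members if (t, b) != (tabulator, batch)])
--     return groups_of_identical_batches
-- ===== Notes on version B (the rewrite author's own statement) =====
-- stated objective: faster
-- what changed: Instead of rescanning every batch of the whole structure for each batch (nested quadratic loops with dict comparisons), B canonicalises each tally dict once into a sorted item tuple and groups all (tabulator, batch) pairs in one pass via a hash index, then emits each group by a single lookup.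
import Mathlib
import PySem

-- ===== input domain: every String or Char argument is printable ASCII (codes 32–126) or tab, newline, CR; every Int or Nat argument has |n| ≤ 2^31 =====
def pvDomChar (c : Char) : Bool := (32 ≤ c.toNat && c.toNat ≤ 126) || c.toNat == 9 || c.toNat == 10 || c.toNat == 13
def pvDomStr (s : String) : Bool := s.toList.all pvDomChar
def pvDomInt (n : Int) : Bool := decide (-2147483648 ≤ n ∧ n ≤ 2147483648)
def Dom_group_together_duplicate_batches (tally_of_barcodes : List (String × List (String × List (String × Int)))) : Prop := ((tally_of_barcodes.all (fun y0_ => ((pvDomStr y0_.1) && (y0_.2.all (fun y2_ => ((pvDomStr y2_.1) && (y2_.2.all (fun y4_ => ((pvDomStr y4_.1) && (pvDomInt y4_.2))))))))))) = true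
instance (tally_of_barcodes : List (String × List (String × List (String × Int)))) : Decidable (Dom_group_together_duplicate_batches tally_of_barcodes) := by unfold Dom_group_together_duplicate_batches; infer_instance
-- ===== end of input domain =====

-- B replaces A's rescan of all batches for every batch by an index keyed by the canonically
-- sorted tally items, built in one pass (objective: faster).


-- ===== PORT A =====
-- f"/{t}/{b}"
def pvPath (t b : String) : String := "/" ++ t ++ "/" ++ b

-- Python '==' on two dicts given as association lists: same size and every key/value pair of
-- the first found in the second.  Exact for lists with distinct keys (guaranteed by Pre_).
def pvDictEq (d1 d2 : List (String × Int)) : Bool :=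
  (d1.length == d2.length) && d1.all (fun kv => d2.lookup kv.1 == some kv.2)

-- literal transliteration of A: for every non-"total" (tabulator1, batch1), rescan the whole
-- structure for equal tallies; under Pre_ (distinct keys) iterating the pairs is dict
-- iteration and a pair's value is the dict lookup.
def group_together_duplicate_batches (tally_of_barcodes : List (String × List (String × List (String × Int)))) : List (List String) :=
  tally_of_barcodes.foldl (fun groups tb1 =>
    if tb1.1 != "total" then
      tb1.2.foldl (fun groups bb1 =>
        if bb1.1 != "total" then
          let group := tally_of_barcodes.foldl (fun g tb2 =>
            tb2.2.foldl (fun g bb2 =>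
              if pvDictEq bb1.2 bb2.2 && (tb1.1 != tb2.1 || bb1.1 != bb2.1) then
                g ++ [pvPath tb2.1 bb2.1]
              else g) g) [pvPath tb1.1 bb1.1]
          if group.length > 1 then groups ++ [group] else groups
        else groups) groups
    else groups) []

-- ===== PORT B =====
-- tuple(sorted(tally.items(), key=lambda kv: kv[0]))
def pvCanon (d : List (String × Int)) : List (String × Int) :=
  PySem.List.sorted d (fun kv => kv.1)

-- index: canonical tally -> list of its (tabulator, batch) carriers in iteration order
def pvIndex (tally_of_barcodes : List (String × List (String × List (String × Int)))) :
    PySem.Dict (List (String × Int)) (List (String × String)) :=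
  tally_of_barcodes.foldl (fun idx tb =>
    tb.2.foldl (fun idx bb =>
      idx.insert (pvCanon bb.2) (idx.getD (pvCanon bb.2) [] ++ [(tb.1, bb.1)])) idx)
    PySem.Dict.empty

-- literal transliteration of B (Source B): build the index once, then one lookup per batch.
def group_together_duplicate_batches_alt (tally_of_barcodes : List (String × List (String × List (String × Int)))) : List (List String) :=
  let idx := pvIndex tally_of_barcodes
  tally_of_barcodes.foldl (fun res tb =>
    if tb.1 != "total" then
      tb.2.foldl (fun res bb =>
        if bb.1 != "total" then
          let members := idx.getD (pvCanon bb.2) []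
          if members.length > 1 then
            res ++ [pvPath tb.1 bb.1 ::
              (members.filter (fun p => p != (tb.1, bb.1))).map (fun p => pvPath p.1 p.2)]
          else res
        else res) res
    else res) []

-- ===== PRECONDITION & SPEC =====
-- Pre_ excludes only association lists with a duplicated key at some level: those do not
-- represent Python dicts (the argument is a dict of dicts of dicts), so A never receives them.
def Pre_group_together_duplicate_batches (tally_of_barcodes : List (String × List (String × List (String × Int)))) : Prop :=
  (tally_of_barcodes.map Prod.fst).Nodup ∧
  ∀ tb ∈ tally_of_barcodes, (tb.2.map Prod.fst).Nodup ∧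
    ∀ bb ∈ tb.2, (bb.2.map Prod.fst).Nodup
instance (tally_of_barcodes : List (String × List (String × List (String × Int)))) : Decidable (Pre_group_together_duplicate_batches tally_of_barcodes) := by unfold Pre_group_together_duplicate_batches; infer_instance

def pvWitness_group_together_duplicate_batches : (List (String × List (String × List (String × Int)))) :=
  [("1", [("a", [("z", 2), ("y", 1)]), ("b", [("y", 1), ("z", 2)])]),
   ("2", [("a", [("z", 3)])])]

def Spec_group_together_duplicate_batches (tally_of_barcodes : List (String × List (String × List (String × Int)))) (out : List (List String)) : Prop := out = group_together_duplicate_batches_alt tally_of_barcodes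
instance (tally_of_barcodes : List (String × List (String × List (String × Int)))) (out : List (List String)) : Decidable (Spec_group_together_duplicate_batches tally_of_barcodes out) := by unfold Spec_group_together_duplicate_batches; infer_instance

-- ===== CLAIM (what is proved, stated in full; the proofs are below) =====
def Claim_equal_group_together_duplicate_batches : Prop := ∀ (tally_of_barcodes : List (String × List (String × List (String × Int)))), Dom_group_together_duplicate_batches tally_of_barcodes → Pre_group_together_duplicate_batches tally_of_barcodes → Spec_group_together_duplicate_batches tally_of_barcodes (group_together_duplicate_batches tally_of_barcodes)

-- ===== LEMMAS AND PROOFS =====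

-- All (tabulator, batch, tally) entries in iteration order.
def pvAll (t : List (String × List (String × List (String × Int)))) :
    List (String × String × List (String × Int)) :=
  t.flatMap (fun tb => tb.2.map (fun bb => (tb.1, bb.1, bb.2)))

-- named loop bodies of the two ports, over the flattened entry list
def pvGroupA (t : List (String × List (String × List (String × Int))))
    (e : String × String × List (String × Int)) : List String :=
  t.foldl (fun g tb2 =>
    tb2.2.foldl (fun g bb2 =>
      if pvDictEq e.2.2 bb2.2 && (e.1 != tb2.1 || e.2.1 != bb2.1) then
        g ++ [pvPath tb2.1 bb2.1]
      else g) g) [pvPath e.1 e.2.1]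

def pvStepA (t : List (String × List (String × List (String × Int))))
    (acc : List (List String)) (e : String × String × List (String × Int)) :
    List (List String) :=
  if e.1 != "total" then
    if e.2.1 != "total" then
      let group := pvGroupA t e
      if group.length > 1 then acc ++ [group] else acc
    else acc
  else acc

def pvStepB (idx : PySem.Dict (List (String × Int)) (List (String × String)))
    (acc : List (List String)) (e : String × String × List (String × Int)) :
    List (List String) :=
  if e.1 != "total" then
    if e.2.1 != "total" then
      let members := idx.getD (pvCanon e.2.2) []
      if members.length > 1 then
        acc ++ [pvPath e.1 e.2.1 ::
          (members.filter (fun p => p != (e.1, e.2.1))).map (fun p => pvPath p.1 p.2)]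
      else acc
    else acc
  else acc

def pvIndexStep (idx : PySem.Dict (List (String × Int)) (List (String × String)))
    (e : String × String × List (String × Int)) :
    PySem.Dict (List (String × Int)) (List (String × String)) :=
  idx.insert (pvCanon e.2.2) (idx.getD (pvCanon e.2.2) [] ++ [(e.1, e.2.1)])

-- generic flattening of the nested tabulator/batch loop
theorem pv_nested_foldl {β : Type} (t : List (String × List (String × List (String × Int))))
    (g : β → String × String × List (String × Int) → β) (init : β) :
    t.foldl (fun acc tb => tb.2.foldl (fun acc bb => g acc (tb.1, bb.1, bb.2)) acc) init
      = (pvAll t).foldl g init := by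
  simp [pvAll, List.foldl_flatMap, List.foldl_map]

theorem pv_foldl_guard {α β : Type} (c : Bool) (g : β → α → β) (l : List α) (res : β) :
    (if c then l.foldl g res else res) = l.foldl (fun r x => if c then g r x else r) res := by
  cases c <;> simp

-- association-list lookup facts (distinct keys)
theorem pv_lookup_mem {d : List (String × Int)} {k : String} {v : Int}
    (h : d.lookup k = some v) : (k, v) ∈ d := by
  induction d with
  | nil => simp [List.lookup] at h
  | cons hd tl ih =>
    rw [show hd = (hd.1, hd.2) from rfl, List.lookup_cons] at h
    by_cases hk : (k == hd.1) = true
    · simp [hk] at h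
      simp [eq_of_beq hk, ← h]
    · simp only [hk] at h
      exact List.mem_cons_of_mem _ (ih h)

theorem pv_mem_lookup {d : List (String × Int)} {k : String} {v : Int}
    (hn : (d.map Prod.fst).Nodup) (h : (k, v) ∈ d) : d.lookup k = some v := by
  induction d with
  | nil => simp at h
  | cons hd tl ih =>
    simp only [List.map_cons, List.nodup_cons] at hn
    rw [show hd = (hd.1, hd.2) from rfl, List.lookup_cons]
    rcases List.mem_cons.1 h with h1 | h1
    · have hk : k = hd.1 := congrArg Prod.fst h1
      have hv : v = hd.2 := congrArg Prod.snd h1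
      simp [hk, hv]
    · have hk : k ≠ hd.1 := fun he =>
        hn.1 (he ▸ List.mem_map.2 ⟨(k, v), h1, rfl⟩)
      have : (k == hd.1) = false := beq_eq_false_iff_ne.2 hk
      simp only [this]
      exact ih hn.2 h1

theorem pv_canon_pairwise_lt {d : List (String × Int)} (hn : (d.map Prod.fst).Nodup) :
    (pvCanon d).Pairwise (fun a b => a.1 < b.1) := by
  have hperm : (pvCanon d).Perm d := PySem.List.sorted_perm d (fun kv => kv.1) false
  have hle : (pvCanon d).Pairwise (fun a b => a.1 ≤ b.1) :=
    PySem.List.sorted_pairwise d (fun kv => kv.1)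
  have hnd : ((pvCanon d).map Prod.fst).Nodup :=
    ((hperm.map Prod.fst).nodup_iff).2 hn
  have hne : (pvCanon d).Pairwise (fun a b => a.1 ≠ b.1) :=
    (List.pairwise_map.mp hnd)
  exact (hle.and hne).imp (fun h => lt_of_le_of_ne h.1 h.2)

-- Python dict equality coincides with equality of the canonical sorted item lists.
theorem pv_dictEq_iff_canon {d1 d2 : List (String × Int)}
    (h1 : (d1.map Prod.fst).Nodup) (h2 : (d2.map Prod.fst).Nodup) :
    pvDictEq d1 d2 = true ↔ pvCanon d1 = pvCanon d2 := by
  constructor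
  · intro h
    simp only [pvDictEq, Bool.and_eq_true, beq_iff_eq, List.all_eq_true] at h
    obtain ⟨hlen, hall⟩ := h
    have hsub : d1 ⊆ d2 := by
      intro kv hkv
      have : (kv.1, kv.2) ∈ d2 := pv_lookup_mem (hall kv hkv)
      simpa using this
    have hnd1 : d1.Nodup := h1.of_map
    have hperm : d1.Perm d2 :=
      (hnd1.subperm hsub).perm_of_length_le (le_of_eq hlen.symm)
    have : (pvCanon d1).Perm d2 :=
      (PySem.List.sorted_perm d1 (fun kv => kv.1) false).trans hperm
    exact (PySem.List.sorted_eq_of_perm_of_pairwise_lt d2 (pvCanon d1) (fun kv => kv.1)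
      this (pv_canon_pairwise_lt h1)).symm
  · intro h
    have hperm : d1.Perm d2 :=
      ((PySem.List.sorted_perm d1 (fun kv => kv.1) false).symm.trans
        (by rw [show PySem.List.sorted d1 (fun kv => kv.1) = pvCanon d1 from rfl, h]
            exact PySem.List.sorted_perm d2 (fun kv => kv.1) false))
    simp only [pvDictEq, Bool.and_eq_true, beq_iff_eq, List.all_eq_true]
    refine ⟨hperm.length_eq, fun kv hkv => ?_⟩
    have : kv ∈ d2 := hperm.mem_iff.1 hkv
    exact pv_mem_lookup h2 (by simpa using this)

theorem pv_index_aux (l : List (String × String × List (String × Int)))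
    (idx : PySem.Dict (List (String × Int)) (List (String × String)))
    (k : List (String × Int)) :
    (l.foldl pvIndexStep idx).getD k []
      = idx.getD k [] ++ (l.filter (fun e => pvCanon e.2.2 == k)).map (fun e => (e.1, e.2.1)) := by
  induction l generalizing idx with
  | nil => simp
  | cons e l ih =>
    simp only [List.foldl_cons, ih, List.filter_cons, pvIndexStep]
    rw [PySem.Dict.getD_insert]
    by_cases hk : k = pvCanon e.2.2
    · simp [hk]
    · rw [if_neg hk, if_neg (fun h : (pvCanon e.2.2 == k) = true => hk (beq_iff_eq.1 h).symm)]

-- the index maps each canonical tally to all its (tabulator, batch) carriers, in order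
theorem pv_index_getD (t : List (String × List (String × List (String × Int)))) (k : List (String × Int)) :
    (pvIndex t).getD k []
      = ((pvAll t).filter (fun e => pvCanon e.2.2 == k)).map (fun e => (e.1, e.2.1)) := by
  have h : pvIndex t = (pvAll t).foldl pvIndexStep PySem.Dict.empty :=
    pv_nested_foldl t pvIndexStep PySem.Dict.empty
  rw [h, pv_index_aux]
  simp [pysem]

-- the (tabulator, batch) pairs are pairwise distinct under Pre_
theorem pv_pairs_nodup {t : List (String × List (String × List (String × Int)))}
    (hp : Pre_group_together_duplicate_batches t) :
    ((pvAll t).map (fun e => (e.1, e.2.1))).Nodup := by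
  have : (pvAll t).map (fun e => (e.1, e.2.1))
      = t.flatMap (fun tb => tb.2.map (fun bb => (tb.1, bb.1))) := by
    simp only [pvAll, List.map_flatMap]
    congr 1
    funext tb
    simp
  rw [this]
  rw [List.nodup_flatMap]
  constructor
  · intro tb htb
    have h1 : (tb.2.map Prod.fst).Nodup := (hp.2 tb htb).1
    have : tb.2.map (fun bb => (tb.1, bb.1)) = (tb.2.map Prod.fst).map (fun b => (tb.1, b)) := by
      simp [Function.comp]
    rw [this]
    exact h1.map (fun a b h => congrArg Prod.snd h)
  · have hnd : t.Pairwise (fun a b => a.1 ≠ b.1) := List.pairwise_map.mp hp.1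
    exact hnd.imp (fun {a b} hab => by
      intro x hx1 hx2
      simp only [List.mem_map] at hx1 hx2
      obtain ⟨bb1, _, h1⟩ := hx1
      obtain ⟨bb2, _, h2⟩ := hx2
      exact hab ((congrArg Prod.fst h1).trans (congrArg Prod.fst h2).symm))

-- keys of each tally are nodup
theorem pv_keys_nodup {t : List (String × List (String × List (String × Int)))}
    (hp : Pre_group_together_duplicate_batches t)
    {e : String × String × List (String × Int)} (he : e ∈ pvAll t) :
    (e.2.2.map Prod.fst).Nodup := by
  simp only [pvAll, List.mem_flatMap, List.mem_map] at he
  obtain ⟨tb, htb, bb, hbb, hbe⟩ := he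
  have := (hp.2 tb htb).2 bb hbb
  rw [← hbe]
  exact this

-- A's inner rescan, flattened: self first, then every equal batch in iteration order
theorem pv_groupA_eq (t : List (String × List (String × List (String × Int))))
    (e : String × String × List (String × Int)) :
    pvGroupA t e = pvPath e.1 e.2.1 ::
      (((pvAll t).filter (fun e2 => pvDictEq e.2.2 e2.2.2 && (e.1 != e2.1 || e.2.1 != e2.2.1))).map
        (fun e2 => pvPath e2.1 e2.2.1)) := by
  have h : pvGroupA t e = (pvAll t).foldl
      (fun g e2 => if pvDictEq e.2.2 e2.2.2 && (e.1 != e2.1 || e.2.1 != e2.2.1) then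
        g ++ [pvPath e2.1 e2.2.1] else g) [pvPath e.1 e.2.1] :=
    pv_nested_foldl t (fun g e2 => if pvDictEq e.2.2 e2.2.2 && (e.1 != e2.1 || e.2.1 != e2.2.1) then
        g ++ [pvPath e2.1 e2.2.1] else g) [pvPath e.1 e.2.1]
  rw [h, PySem.List.foldl_append_if]
  simp

theorem pv_bne_pair (a b c d : String) : (a != c || b != d) = ((c, d) != (a, b)) := by
  rw [Bool.eq_iff_iff]
  simp only [Bool.or_eq_true, bne_iff_ne, ne_eq, Prod.mk.injEq, not_and]
  constructor
  · rintro (h | h) h1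
    · exact absurd h1.symm h
    · intro h2; exact h h2.symm
  · intro h
    by_cases h1 : a = c
    · exact Or.inr (fun h2 => h h1.symm h2.symm)
    · exact Or.inl h1

-- the two loop bodies agree on every entry of the structure
theorem pv_step_eq {t : List (String × List (String × List (String × Int)))}
    (hp : Pre_group_together_duplicate_batches t)
    (acc : List (List String)) (e : String × String × List (String × Int))
    (he : e ∈ pvAll t) :
    pvStepA t acc e = pvStepB (pvIndex t) acc e := by
  cases hg1 : (e.1 != "total") with
  | false => simp [pvStepA, pvStepB, hg1]
  | true =>
  cases hg2 : (e.2.1 != "total") with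
  | false => simp [pvStepA, pvStepB, hg1, hg2]
  | true =>
  simp only [pvStepA, pvStepB, hg1, hg2, if_true]
  have hm : (pvIndex t).getD (pvCanon e.2.2) []
      = ((pvAll t).filter (fun e2 => pvCanon e2.2.2 == pvCanon e.2.2)).map (fun e2 => (e2.1, e2.2.1)) :=
    pv_index_getD t _
  -- the two filter predicates agree on the entries
  have hfil : (pvAll t).filter (fun e2 => ((e2.1, e2.2.1) != (e.1, e.2.1)) && (pvCanon e2.2.2 == pvCanon e.2.2))
      = (pvAll t).filter (fun e2 => pvDictEq e.2.2 e2.2.2 && (e.1 != e2.1 || e.2.1 != e2.2.1)) := by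
    apply List.filter_congr
    intro e2 he2
    have hk1 := pv_keys_nodup hp he
    have hk2 := pv_keys_nodup hp he2
    have hd : pvDictEq e.2.2 e2.2.2 = (pvCanon e2.2.2 == pvCanon e.2.2) := by
      rw [Bool.eq_iff_iff, beq_iff_eq]
      constructor
      · intro h; exact ((pv_dictEq_iff_canon hk1 hk2).1 h).symm
      · intro h; exact (pv_dictEq_iff_canon hk1 hk2).2 h.symm
    rw [hd, pv_bne_pair, Bool.and_comm]
  -- the members list: tail and length
  have htail : (((pvIndex t).getD (pvCanon e.2.2) []).filter (fun p => p != (e.1, e.2.1))).map (fun p => pvPath p.1 p.2)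
      = ((pvAll t).filter (fun e2 => pvDictEq e.2.2 e2.2.2 && (e.1 != e2.1 || e.2.1 != e2.2.1))).map
          (fun e2 => pvPath e2.1 e2.2.1) := by
    rw [hm, List.filter_map, List.map_map, List.filter_filter]
    simp only [Function.comp_def]
    rw [hfil]
  have hsub : (((pvAll t).filter (fun e2 => pvCanon e2.2.2 == pvCanon e.2.2)).map (fun e2 => (e2.1, e2.2.1))).Sublist
      ((pvAll t).map (fun e2 => (e2.1, e2.2.1))) :=
    List.Sublist.map _ List.filter_sublist
  have hnodup : (((pvAll t).filter (fun e2 => pvCanon e2.2.2 == pvCanon e.2.2)).map (fun e2 => (e2.1, e2.2.1))).Nodup :=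
    hsub.nodup (pv_pairs_nodup hp)
  have hmem : (e.1, e.2.1) ∈ ((pvAll t).filter (fun e2 => pvCanon e2.2.2 == pvCanon e.2.2)).map (fun e2 => (e2.1, e2.2.1)) :=
    List.mem_map.2 ⟨e, List.mem_filter.2 ⟨he, by simp⟩, rfl⟩
  have hone : ((((pvAll t).filter (fun e2 => pvCanon e2.2.2 == pvCanon e.2.2)).map (fun e2 => (e2.1, e2.2.1))).filter
      (fun p => !(p != (e.1, e.2.1)))).length = 1 := by
    simp only [bne, Bool.not_not]
    rw [← List.countP_eq_length_filter, ← List.count_eq_countP]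
    exact List.count_eq_one_of_mem hnodup hmem
  have hlen2 : ((((pvAll t).filter (fun e2 => pvCanon e2.2.2 == pvCanon e.2.2)).map (fun e2 => (e2.1, e2.2.1))).filter
        (fun p => p != (e.1, e.2.1))).length
      = ((pvAll t).filter (fun e2 => pvDictEq e.2.2 e2.2.2 && (e.1 != e2.1 || e.2.1 != e2.2.1))).length := by
    rw [List.filter_map, List.filter_filter]
    simp only [Function.comp_def]
    rw [hfil, List.length_map]
  have hlen : ((pvIndex t).getD (pvCanon e.2.2) []).length = (pvGroupA t e).length := by
    rw [pv_groupA_eq, hm]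
    rw [List.length_eq_length_filter_add (fun p => p != (e.1, e.2.1)), hone, hlen2]
    simp [List.length_cons, List.length_map]
  by_cases hc : ((pvIndex t).getD (pvCanon e.2.2) []).length > 1
  · rw [if_pos hc, if_pos (hlen ▸ hc), pv_groupA_eq, ← htail]
  · rw [if_neg hc, if_neg (fun h => hc (by rw [hlen]; exact h))]

-- ===== VERDICT (by name: the statement is the Claim_ definition above) =====
theorem group_together_duplicate_batches_spec : Claim_equal_group_together_duplicate_batches := by
  intro t _hdom hp
  unfold Spec_group_together_duplicate_batches
  have hA : group_together_duplicate_batches t = (pvAll t).foldl (pvStepA t) [] := by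
    rw [group_together_duplicate_batches, ← pv_nested_foldl t (pvStepA t) []]
    refine PySem.List.foldl_congr_mem t _ _ [] (fun acc tb _ => ?_)
    rw [pv_foldl_guard]
    rfl
  have hB : group_together_duplicate_batches_alt t = (pvAll t).foldl (pvStepB (pvIndex t)) [] := by
    rw [group_together_duplicate_batches_alt, ← pv_nested_foldl t (pvStepB (pvIndex t)) []]
    refine PySem.List.foldl_congr_mem t _ _ [] (fun acc tb _ => ?_)
    rw [pv_foldl_guard]
    rfl
  rw [hA, hB]
  exact PySem.List.foldl_congr_mem _ _ _ [] (fun acc e he => pv_step_eq hp acc e he)
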